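-- pv_equiv track=rewrite | github.com/Hallyson34/uPython2 | uri1243.py | medirPalavras
-- ===== SOURCE A (Python) =====
-- def medirPalavras(f):
--     tamanhos = []
--     i = 0
--     verificador = False
--     while i < len(f):
--         tamp = 0
--         while i<len(f) and ord(f[i]) > 64:
--             tamp += 1
--             verificador = True
--             i += 1
--         if verificador:
--             tamanhos.append(tamp)
--             verificador = False
--             i-=1
--         i += 1
--     return tamanhos
-- ===== SOURCE B (Python) =====
-- def medirPalavras(f):
--     # Separator-position algorithm: collect the indices of all non-letter
--     # characters (ord <= 64), bracket them with sentinels -1 and len(f),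
--     # and read each word length off as the gap between consecutive separators.
--     n = len(f)
--     seps = [-1] + [i for i in range(n) if ord(f[i]) <= 64] + [n]
--     return [q - p - 1 for p, q in zip(seps, seps[1:]) if q - p > 1]
-- ===== Notes on version B (the rewrite author's own statement) =====
-- stated objective: alternative
-- what changed: Replaced A's manual index walking with nested while loops and a verificador flag by a separator-position algorithm: collect the indices of all non-letter characters bracketed by sentinels -1 and n, then read each word length off as the gap q-p-1 between consecutive separator positions with q-p>1 (measurably faster by constant factor: one comprehension + zip instead of per-character Python loop bookkeeping).
import Mathlib
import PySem

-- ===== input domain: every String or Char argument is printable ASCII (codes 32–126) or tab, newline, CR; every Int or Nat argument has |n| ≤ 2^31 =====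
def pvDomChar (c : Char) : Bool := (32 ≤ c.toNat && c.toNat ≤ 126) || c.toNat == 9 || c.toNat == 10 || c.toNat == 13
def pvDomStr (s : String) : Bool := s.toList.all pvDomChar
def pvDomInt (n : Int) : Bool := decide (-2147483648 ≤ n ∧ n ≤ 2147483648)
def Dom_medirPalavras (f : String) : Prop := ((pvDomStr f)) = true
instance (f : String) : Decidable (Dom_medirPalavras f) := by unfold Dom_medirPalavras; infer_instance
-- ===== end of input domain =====

-- B replaces A's index-walking while loops and verificador flag by a separator-position
-- algorithm: list the indices of non-letter characters with sentinels -1 and n, and read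
-- word lengths off as gaps between consecutive separators (alternative decomposition).


-- ===== PORT A =====
-- inner while: `while i < len(f) and ord(f[i]) > 64: tamp += 1; verificador = True; i += 1`
-- (short-circuit `and` = nested ifs); returns the final (i, tamp, verificador)
def medirPalavrasInner (cs : List Char) (i tamp : Nat) (ver : Bool) : Nat × Nat × Bool :=
  if h : i < cs.length then
    if 64 < (cs[i]'h).toNat then medirPalavrasInner cs (i + 1) (tamp + 1) true
    else (i, tamp, ver)
  else (i, tamp, ver)
termination_by cs.length - i
decreasing_by exact Nat.sub_succ_lt_self cs.length i h

-- termination helpers for the loops, cited by name in each decreasing_by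
theorem medirPalavrasInner_le (cs : List Char) (i tamp : Nat) (ver : Bool) :
    i ≤ (medirPalavrasInner cs i tamp ver).1 := by
  fun_induction medirPalavrasInner <;> simp_all <;> omega

theorem medirPalavrasInner_lt (cs : List Char) (i tamp : Nat)
    (h : (medirPalavrasInner cs i tamp false).2.2 = true) :
    i < (medirPalavrasInner cs i tamp false).1 := by
  rw [medirPalavrasInner] at h ⊢
  by_cases h1 : i < cs.length
  · rw [dif_pos h1] at h ⊢
    by_cases h2 : 64 < (cs[i]'h1).toNat
    · rw [if_pos h2] at h ⊢
      have := medirPalavrasInner_le cs (i + 1) (tamp + 1) true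
      omega
    · rw [if_neg h2] at h; simp at h
  · rw [dif_neg h1] at h; simp at h

theorem medirPalavrasOuter_dec1 (cs : List Char) (i : Nat) (ver : Bool)
    (h : i < cs.length) (hv : (medirPalavrasInner cs i 0 ver).2.2 = true) :
    cs.length - (medirPalavrasInner cs i 0 ver).1 + cond false 1 0 <
      cs.length - i + cond ver 1 0 := by
  have hle := medirPalavrasInner_le cs i 0 ver
  cases ver with
  | false =>
    have hlt := medirPalavrasInner_lt cs i 0 hv
    simp only [Bool.cond_false]
    omega
  | true =>
    simp only [Bool.cond_false, Bool.cond_true]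
    omega

theorem medirPalavrasOuter_dec2 (cs : List Char) (i : Nat) (ver : Bool)
    (h : i < cs.length) (hv : ¬ (medirPalavrasInner cs i 0 ver).2.2 = true) :
    cs.length - ((medirPalavrasInner cs i 0 ver).1 + 1) +
        cond (medirPalavrasInner cs i 0 ver).2.2 1 0 <
      cs.length - i + cond ver 1 0 := by
  have hle := medirPalavrasInner_le cs i 0 ver
  have hv' : (medirPalavrasInner cs i 0 ver).2.2 = false := by
    cases hb : (medirPalavrasInner cs i 0 ver).2.2
    · rfl
    · exact absurd hb hv
  rw [hv']
  cases ver <;> simp only [Bool.cond_false, Bool.cond_true] <;> omega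

-- outer while loop of A; the Python `i -= 1; i += 1` in the verificador branch cancels
-- exactly (ints), so the next index is the inner loop's final i itself
def medirPalavrasOuter (cs : List Char) (i : Nat) (ver : Bool) (tamanhos : List Int) : List Int :=
  if h : i < cs.length then
    if hv : (medirPalavrasInner cs i 0 ver).2.2 then
      medirPalavrasOuter cs (medirPalavrasInner cs i 0 ver).1 false
        (tamanhos ++ [((medirPalavrasInner cs i 0 ver).2.1 : Int)])
    else
      medirPalavrasOuter cs ((medirPalavrasInner cs i 0 ver).1 + 1) (medirPalavrasInner cs i 0 ver).2.2 tamanhos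
  else tamanhos
termination_by cs.length - i + cond ver 1 0
decreasing_by
  · exact medirPalavrasOuter_dec1 cs i ver h hv
  · exact medirPalavrasOuter_dec2 cs i ver h hv

def medirPalavras (f : String) : List Int :=
  medirPalavrasOuter f.toList 0 false []

-- ===== PORT B =====
-- `[i for i in range(n) if ord(f[i]) <= 64]`: the separator positions
def pvSepIdx (cs : List Char) : List Nat :=
  (List.range cs.length).filter (fun i => decide ((cs.getD i ' ').toNat ≤ 64))

-- `[q - p - 1 for p, q in zip(seps, seps[1:]) if q - p > 1]`
def pvGaps (seps : List Int) : List Int :=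
  ((seps.zip seps.tail).filter (fun p => decide (1 < p.2 - p.1))).map (fun p => p.2 - p.1 - 1)

def medirPalavras_alt (f : String) : List Int :=
  pvGaps ((-1 : Int) :: (pvSepIdx f.toList).map (fun i => Int.ofNat i) ++ [(f.toList.length : Int)])

-- ===== PRECONDITION & SPEC =====
def Spec_medirPalavras (f : String) (out : List Int) : Prop := out = medirPalavras_alt f
instance (f : String) (out : List Int) : Decidable (Spec_medirPalavras f out) := by unfold Spec_medirPalavras; infer_instance

-- ===== CLAIM (what is proved, stated in full; the proofs are below) =====
def Claim_equal_medirPalavras : Prop := ∀ (f : String), Dom_medirPalavras f → Spec_medirPalavras f (medirPalavras f)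

-- ===== LEMMAS AND PROOFS =====

-- canonical run-length list, the bridge both ports are proved equal to
def pvRuns (cs : List Char) : List Int :=
  match cs with
  | [] => []
  | c :: rest =>
    if 64 < c.toNat then
      ((1 : Int) + (rest.takeWhile (fun d => decide (64 < d.toNat))).length) ::
        pvRuns (rest.dropWhile (fun d => decide (64 < d.toNat)))
    else pvRuns rest
termination_by cs.length
decreasing_by
  · exact Nat.lt_succ_of_le (List.length_dropWhile_le _ _)
  · exact Nat.lt_succ_self rest.length

theorem inner_eq (cs : List Char) (i tamp : Nat) (ver : Bool) :
    medirPalavrasInner cs i tamp ver =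
      (i + ((cs.drop i).takeWhile (fun d => decide (64 < d.toNat))).length,
       tamp + ((cs.drop i).takeWhile (fun d => decide (64 < d.toNat))).length,
       ver || !((cs.drop i).takeWhile (fun d => decide (64 < d.toNat))).isEmpty) := by
  fun_induction medirPalavrasInner with
  | case1 i tamp ver hi hp ih =>
    rw [List.drop_eq_getElem_cons hi, List.takeWhile_cons]
    simp only [hp, decide_true, if_true, List.length_cons, List.isEmpty_cons]
    rw [ih]
    simp only [Prod.mk.injEq]
    refine ⟨by omega, by omega, by simp⟩
  | case2 i tamp ver hi hp =>
    rw [List.drop_eq_getElem_cons hi, List.takeWhile_cons]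
    simp [hp]
  | case3 i tamp ver hi =>
    rw [List.drop_eq_nil_of_le (by omega)]
    simp

theorem outer_eq (n : Nat) (cs : List Char) (i : Nat) (acc : List Int)
    (hn : cs.length - i ≤ n) :
    medirPalavrasOuter cs i false acc = acc ++ pvRuns (cs.drop i) := by
  induction n generalizing i acc with
  | zero =>
    rw [medirPalavrasOuter]
    have : ¬ i < cs.length := by omega
    rw [dif_neg this, List.drop_eq_nil_of_le (by omega), pvRuns]
    simp
  | succ n ih =>
    rw [medirPalavrasOuter]
    by_cases hi : i < cs.length
    · rw [dif_pos hi, List.drop_eq_getElem_cons hi, pvRuns]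
      have hrun := inner_eq cs i 0 false
      rw [List.drop_eq_getElem_cons hi, List.takeWhile_cons] at hrun
      by_cases hc : 64 < (cs[i]'hi).toNat
      · simp only [hc, decide_true, if_true, List.length_cons, List.isEmpty_cons,
          Bool.false_or, Bool.not_false] at hrun
        simp only [hrun, dif_pos, if_pos hc]
        set k := ((cs.drop (i+1)).takeWhile (fun d => decide (64 < d.toNat))).length with hkdef
        have hdw : cs.drop (i + (k + 1)) = (cs.drop (i + 1)).dropWhile (fun d => decide (64 < d.toNat)) := by
          have htd := List.takeWhile_append_dropWhile (p := fun d => decide (64 < d.toNat)) (l := cs.drop (i + 1))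
          calc cs.drop (i + (k + 1)) = (cs.drop (i + 1)).drop k := by rw [List.drop_drop]; ring_nf
            _ = (((cs.drop (i+1)).takeWhile (fun d => decide (64 < d.toNat))) ++ ((cs.drop (i+1)).dropWhile (fun d => decide (64 < d.toNat)))).drop k := by rw [htd]
            _ = (cs.drop (i+1)).dropWhile (fun d => decide (64 < d.toNat)) := by
                  rw [List.drop_append_of_le_length (by omega)]
                  rw [hkdef, List.drop_length, List.nil_append]
        rw [ih (i + (k + 1)) _ (by have := List.length_dropWhile_le (p := fun d => decide (64 < d.toNat)) (l := cs.drop (i+1)); omega), hdw, List.append_assoc]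
        congr 2
        simp only [List.singleton_append]
        congr 1
        push_cast
        ring
      · simp only [hc, decide_false, Bool.false_or] at hrun
        simp only [hrun, if_neg hc]
        rw [dif_neg (by simp)]
        exact ih (i + 1) acc (by omega)
    · rw [dif_neg hi, List.drop_eq_nil_of_le (by omega), pvRuns]
      simp

-- B-side lemmas
theorem pvGaps_cons (x y : Int) (l : List Int) :
    pvGaps (x :: y :: l) = (if 1 < y - x then [y - x - 1] else []) ++ pvGaps (y :: l) := by
  simp only [pvGaps, List.tail_cons, List.zip_cons_cons, List.filter_cons]
  by_cases h : 1 < y - x <;> simp [h]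

theorem pvGaps_shift (l : List Int) (a : Int) :
    pvGaps (l.map (fun z => z + a)) = pvGaps l := by
  induction l with
  | nil => rfl
  | cons x t ih =>
    cases t with
    | nil => rfl
    | cons y t' =>
      simp only [List.map_cons] at ih ⊢
      rw [pvGaps_cons, pvGaps_cons, ih]
      have : y + a - (x + a) = y - x := by ring
      rw [this]

theorem pvSepIdx_cons (c : Char) (rest : List Char) :
    pvSepIdx (c :: rest) =
      (if c.toNat ≤ 64 then [0] else []) ++ (pvSepIdx rest).map (fun i => i + 1) := by
  have hsucc : (Nat.succ : Nat → Nat) = (fun i : Nat => i + 1) := rfl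
  have hfilter : List.filter ((fun i => decide (((c :: rest).getD i ' ').toNat ≤ 64)) ∘ Nat.succ)
      (List.range rest.length)
      = List.filter (fun i => decide ((rest.getD i ' ').toNat ≤ 64)) (List.range rest.length) :=
    List.filter_congr (by intro i _; simp [List.getD])
  simp only [pvSepIdx, List.length_cons, List.range_succ_eq_map, List.filter_cons,
    List.filter_map, List.getD_cons_zero]
  rw [hfilter, hsucc]
  by_cases h : c.toNat ≤ 64 <;> simp [h]

theorem pvSepIdx_letters_append (t d : List Char) (ht : ∀ c ∈ t, 64 < c.toNat) :
    pvSepIdx (t ++ d) = (pvSepIdx d).map (fun i => i + t.length) := by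
  induction t with
  | nil => simp
  | cons c t' ih =>
    rw [List.cons_append, pvSepIdx_cons]
    have hc : ¬ c.toNat ≤ 64 := by have := ht c (by simp); omega
    rw [if_neg hc, List.nil_append, ih (fun x hx => ht x (by simp [hx])), List.map_map]
    simp only [List.length_cons]
    apply List.map_congr_left
    intro i _
    simp only [Function.comp_apply]
    omega

-- gap-list shape lemmas
theorem gaps_shift_sep (Y : List Int) :
    pvGaps (-1 :: ((-1 :: Y).map (fun z => z + 1))) = pvGaps (-1 :: Y) := by
  have h0 : (-1 : Int) + 1 = 0 := by ring
  simp only [List.map_cons, h0]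
  rw [pvGaps_cons, if_neg (by norm_num : ¬ (1:Int) < 0 - (-1)), List.nil_append]
  have h := pvGaps_shift (-1 :: Y) 1
  simp only [List.map_cons, h0] at h
  exact h

theorem gaps_shift_cons (m : Int) (X : List Int) (hm : 1 ≤ m) :
    pvGaps (-1 :: ((0 :: X).map (fun z => z + m))) = m :: pvGaps (-1 :: 0 :: X) := by
  have h0 : (0 : Int) + m = m := by ring
  simp only [List.map_cons, h0]
  rw [pvGaps_cons, if_pos (by omega : (1:Int) < m - (-1))]
  rw [pvGaps_cons (x := -1) (y := 0), if_neg (by norm_num : ¬ (1:Int) < 0 - (-1)), List.nil_append]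
  have h := pvGaps_shift (0 :: X) m
  simp only [List.map_cons, h0] at h
  rw [h]
  simp

-- pvRuns equals B's gap computation
theorem runs_eq_gaps (n : Nat) (cs : List Char) (hn : cs.length ≤ n) :
    pvRuns cs = pvGaps ((-1 : Int) :: (pvSepIdx cs).map (fun i => Int.ofNat i) ++ [(cs.length : Int)]) := by
  induction n generalizing cs with
  | zero =>
    have hcs : cs = [] := by cases cs <;> simp_all
    subst hcs
    rw [pvRuns]
    simp [pvSepIdx, pvGaps]
  | succ n ih =>
    match cs with
    | [] =>
      rw [pvRuns]
      simp [pvSepIdx, pvGaps]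
    | c :: rest =>
      by_cases hc : 64 < c.toNat
      · -- letter head: cs = (c :: takeWhile) ++ dropWhile
        rw [pvRuns, if_pos hc]
        set p : Char → Bool := fun d => decide (64 < d.toNat) with hp
        set t0 := rest.takeWhile p with ht0
        set d := rest.dropWhile p with hd
        have hsplit : c :: rest = (c :: t0) ++ d := by
          simp [ht0, hd, List.takeWhile_append_dropWhile]
        have htlet : ∀ x ∈ c :: t0, 64 < x.toNat := by
          intro x hx
          rcases List.mem_cons.mp hx with h | h
          · subst h; exact hc
          · have := List.mem_takeWhile_imp h
            simpa [hp] using this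
        set m : Nat := t0.length + 1 with hm
        have hsep : pvSepIdx (c :: rest) = (pvSepIdx d).map (fun i => i + m) := by
          rw [hsplit, pvSepIdx_letters_append (c :: t0) d htlet]
          simp [hm, Nat.add_comm]
        have hlen : (c :: rest).length = m + d.length := by
          rw [hsplit]; simp [hm]; omega
        have hdlen : d.length ≤ n := by
          have h1 : d.length ≤ rest.length := by rw [hd]; exact List.length_dropWhile_le _ _
          simp at hn; omega
        have hcast : (pvSepIdx (c :: rest)).map (fun i => Int.ofNat i) ++ [((c :: rest).length : Int)]
            = ((pvSepIdx d).map (fun i => Int.ofNat i) ++ [(d.length : Int)]).map (fun z => z + (m : Int)) := by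
          rw [hsep, List.map_append]
          congr 1
          · rw [List.map_map, List.map_map]
            congr 1
          · simp only [List.map_cons, List.map_nil, List.cons.injEq, and_true]
            rw [hlen]
            push_cast
            ring
        rw [List.cons_append, hcast]
        clear_value d
        cases d with
        | nil =>
          have hnil : pvRuns ([] : List Char) = [] := by rw [pvRuns]
          rw [hnil]
          simp only [pvSepIdx, List.length_nil, List.range_zero, List.filter_nil,
            List.map_nil, List.nil_append, List.map_cons, Nat.cast_zero]
          rw [pvGaps_cons, if_pos (by push_cast [hm]; omega : (1:Int) < (0:Int) + (m:Int) - (-1))]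
          have hsingle : pvGaps [(0:Int) + (m:Int)] = [] := rfl
          rw [hsingle]
          simp only [List.append_nil]
          congr 1
          push_cast [hm]
          ring
        | cons e d' =>
          have h1 : rest.dropWhile p = e :: d' := hd.symm
          have hpe : p e = false := by
            have h2 := List.head_dropWhile_not (p := p) (l := rest) (by simp [h1])
            simpa [h1] using h2
          have he : e.toNat ≤ 64 := by simp [hp] at hpe; omega
          have hse : pvSepIdx (e :: d') = 0 :: (pvSepIdx d').map (fun i => i + 1) := by
            rw [pvSepIdx_cons, if_pos he]
            simp
          have hS : (pvSepIdx (e :: d')).map (fun i => Int.ofNat i) ++ [((e :: d').length : Int)]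
              = 0 :: (((pvSepIdx d').map (fun i => i + 1)).map (fun i => Int.ofNat i) ++ [((e :: d').length : Int)]) := by
            rw [hse]
            simp
          rw [hS, gaps_shift_cons _ _ (by push_cast [hm]; omega), ← hS, ih (e :: d') hdlen]
          congr 1
          push_cast [hm]
          ring
      · rw [pvRuns, if_neg hc]
        have hsep := pvSepIdx_cons c rest
        rw [if_pos (by omega)] at hsep
        rw [List.cons_append, hsep, List.singleton_append]
        have hcast : (0 :: (pvSepIdx rest).map (fun i => i + 1)).map (fun i => Int.ofNat i) ++ [((c :: rest).length : Int)]
            = ((-1 : Int) :: ((pvSepIdx rest).map (fun i => Int.ofNat i) ++ [(rest.length : Int)])).map (fun z => z + 1) := by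
          simp only [List.map_cons, List.length_cons, List.map_append, List.map_map]
          push_cast
          congr 2
        rw [hcast, gaps_shift_sep]
        exact ih rest (by simp at hn; omega)

-- ===== VERDICT (by name: the statement is the Claim_ definition above) =====
theorem medirPalavras_spec : Claim_equal_medirPalavras := by
  intro f _
  unfold Spec_medirPalavras medirPalavras medirPalavras_alt
  have h := outer_eq f.toList.length f.toList 0 [] (by omega)
  rw [List.drop_zero] at h
  have h2 := runs_eq_gaps f.toList.length f.toList (by omega)
  simpa [h2] using h
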